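-- pv_equiv track=rewrite | github.com/lLL1I1/AM-ARP | agents/dynamic_class_generator/dynamic_class_relationship_identifier.py | _normalize_relation
-- ===== SOURCE A (Python) =====
-- def _normalize_relation(relation: str) -> str:
--     replacements = {
--         "<extend>": "<:inheritance>",
--         "<composition>": "<:composition>",
--         "<aggregation>": "<:aggregation>",
--         "<correlation>": "<:association>",
--         "<Dependency>": "<:dependency>"
--     }
--     for chi, eng in replacements.items():
--         relation = relation.replace(chi, eng)
--     return relation.replace(" ", "")
-- ===== SOURCE B (Python) =====
-- def _normalize_relation(relation: str) -> str:
--     replacements = {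
--         "<extend>": "<:inheritance>",
--         "<composition>": "<:composition>",
--         "<aggregation>": "<:aggregation>",
--         "<correlation>": "<:association>",
--         "<Dependency>": "<:dependency>"
--     }
--     out = []
--     i = 0
--     n = len(relation)
--     while i < n:
--         for chi, eng in replacements.items():
--             if relation.startswith(chi, i):
--                 out.append(eng)
--                 i += len(chi)
--                 break
--         else:
--             c = relation[i]
--             if c != ' ':
--                 out.append(c)
--             i += 1
--     return ''.join(out)
-- ===== Notes on version B (the rewrite author's own statement) =====
-- stated objective: alternative
-- what changed: A runs six sequential full-string replace passes (five tokens, then space removal); B makes a single left-to-right pass that emits each token's replacement, drops spaces, and copies other characters.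
import Mathlib
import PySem

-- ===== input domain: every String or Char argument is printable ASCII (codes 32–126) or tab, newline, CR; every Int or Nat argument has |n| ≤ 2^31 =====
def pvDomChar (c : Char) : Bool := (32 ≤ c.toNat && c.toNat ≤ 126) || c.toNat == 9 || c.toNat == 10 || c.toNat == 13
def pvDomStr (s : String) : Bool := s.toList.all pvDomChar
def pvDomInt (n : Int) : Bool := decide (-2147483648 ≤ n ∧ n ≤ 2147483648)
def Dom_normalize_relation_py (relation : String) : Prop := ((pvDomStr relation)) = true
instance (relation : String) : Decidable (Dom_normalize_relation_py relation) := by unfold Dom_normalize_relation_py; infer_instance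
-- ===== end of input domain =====

-- B replaces A's six sequential full-string .replace scans by a single left-to-right pass
-- that emits each token's replacement and drops spaces as it goes (objective: alternative single-pass algorithm).

-- ===== PORT A =====
-- the dict's items in insertion order (Python 3.7+ dicts iterate in insertion order)
def pvReplacementsA : List (String × String) :=
  [("<extend>", "<:inheritance>"),
   ("<composition>", "<:composition>"),
   ("<aggregation>", "<:aggregation>"),
   ("<correlation>", "<:association>"),
   ("<Dependency>", "<:dependency>")]

def normalize_relation_py (relation : String) : String :=
  PySem.Str.replace
    (pvReplacementsA.foldl (fun r p => PySem.Str.replace r p.1 p.2) relation)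
    " " ""

-- ===== PORT B =====
-- the same replacement table, as lists of characters (Source B's `replacements`, in the same order)
def pvPairs : List (List Char × List Char) :=
  [("<extend>".toList, "<:inheritance>".toList),
   ("<composition>".toList, "<:composition>".toList),
   ("<aggregation>".toList, "<:aggregation>".toList),
   ("<correlation>".toList, "<:association>".toList),
   ("<Dependency>".toList, "<:dependency>".toList)]

-- Source B's single while-loop: at each position, first matching token is emitted and skipped,
-- a space is dropped, any other character is copied
def scanRepl (rs : List (List Char × List Char)) : List Char → List Char
  | [] => []
  | c :: t =>
    match rs.find? (fun p => p.1.isPrefixOf (c :: t)) with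
    | some p => p.2 ++ scanRepl rs (t.drop (p.1.length - 1))
    | none => if c = ' ' then scanRepl rs t else c :: scanRepl rs t
  termination_by l => l.length
  decreasing_by
  all_goals simp [List.length_drop]

def normalize_relation_py_alt (relation : String) : String :=
  String.ofList (scanRepl pvPairs relation.toList)

-- ===== PRECONDITION & SPEC =====
def Spec_normalize_relation_py (relation : String) (out : String) : Prop := out = normalize_relation_py_alt relation
instance (relation : String) (out : String) : Decidable (Spec_normalize_relation_py relation out) := by unfold Spec_normalize_relation_py; infer_instance

-- ===== CLAIM (what is proved, stated in full; the proofs are below) =====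
def Claim_equal_normalize_relation_py : Prop := ∀ (relation : String), Dom_normalize_relation_py relation → Spec_normalize_relation_py relation (normalize_relation_py relation)

-- ===== LEMMAS AND PROOFS =====

-- structural version of Python's str.replace with a nonempty pattern
def repl (k v : List Char) : List Char → List Char
  | [] => []
  | c :: t => if k.isPrefixOf (c :: t) then v ++ repl k v (t.drop (k.length - 1)) else c :: repl k v t
  termination_by l => l.length
  decreasing_by
  all_goals simp [List.length_drop]

-- mutual non-prefix
def mm (x y : List Char) : Bool := !(x.isPrefixOf y) && !(y.isPrefixOf x)

-- no occurrence of k starts strictly inside a (even one spanning past a's end)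
def barrier (a k : List Char) : Bool := (List.range a.length).all (fun i => mm (a.drop i) k)

theorem prefix_of_append_left {x y b : List Char} (h : y <+: x ++ b) (hl : y.length ≤ x.length) :
    y <+: x := by
  obtain ⟨r, hr⟩ := h
  have h2 : y = (x ++ b).take y.length := by rw [← hr]; simp
  rw [List.take_append_of_le_length hl] at h2
  rw [h2]; exact List.take_prefix _ _

theorem notPrefix_append {x y : List Char} (h : mm x y = true) (b : List Char) :
    ¬ y <+: x ++ b := by
  simp only [mm, Bool.and_eq_true, Bool.not_eq_true', ← Bool.not_eq_true,
    List.isPrefixOf_iff_prefix] at h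
  intro hyp
  rcases Nat.le_total y.length x.length with hl | hl
  · exact h.2 (prefix_of_append_left hyp hl)
  · apply h.1
    obtain ⟨r, hr⟩ := hyp
    have h2 : x = (x ++ b).take x.length := by simp
    rw [← hr, List.take_append_of_le_length hl] at h2
    rw [h2]; exact List.take_prefix _ _

theorem find?_eq_some_of {α : Type} (pred : α → Bool) (rs : List α) (p : α)
    (hmem : p ∈ rs) (hp : pred p = true) (huniq : ∀ q ∈ rs, pred q = true → q = p) :
    rs.find? pred = some p := by
  induction rs with
  | nil => simp at hmem
  | cons a rs ih =>
    by_cases ha : pred a = true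
    · rw [List.find?_cons_of_pos ha, huniq a (by simp) ha]
    · rw [List.find?_cons_of_neg ha]
      rcases List.mem_cons.mp hmem with rfl | hm
      · exact absurd hp ha
      · exact ih hm (fun q hq => huniq q (by simp [hq]))

theorem barrier_cons {c : Char} {a k : List Char} (h : barrier (c :: a) k = true) :
    mm (c :: a) k = true ∧ barrier a k = true := by
  simp only [barrier, List.all_eq_true, List.mem_range] at h ⊢
  constructor
  · simpa using h 0 (by simp)
  · intro i hi
    simpa using h (i + 1) (by simpa using hi)

theorem scanRepl_cons_some {rs : List (List Char × List Char)} {c : Char} {t : List Char}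
    {p : List Char × List Char}
    (h : rs.find? (fun p => p.1.isPrefixOf (c :: t)) = some p) :
    scanRepl rs (c :: t) = p.2 ++ scanRepl rs (t.drop (p.1.length - 1)) := by
  rw [scanRepl, h]

theorem scanRepl_cons_none {rs : List (List Char × List Char)} {c : Char} {t : List Char}
    (h : rs.find? (fun p => p.1.isPrefixOf (c :: t)) = none) :
    scanRepl rs (c :: t) = if c = ' ' then scanRepl rs t else c :: scanRepl rs t := by
  rw [scanRepl, h]

-- a '<'-free prefix of repl's output is a prefix of its input (values start with '<')
theorem clean_prefix {k v : List Char} (hv : v.head? = some '<') (t : List Char) :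
    ∀ x : List Char, (∀ c ∈ x, c ≠ '<') → x <+: repl k v t → x <+: t := by
  induction t using repl.induct k with
  | case1 =>
    intro x _ hx
    simpa [repl] using hx
  | case2 c t hpre ih =>
    intro x hcl hx
    rw [repl, if_pos hpre] at hx
    match x, hx with
    | [], _ => exact List.nil_prefix
    | xc :: x', hx =>
      obtain ⟨v', rfl⟩ : ∃ v', v = '<' :: v' := by
        cases v with
        | nil => simp at hv
        | cons a v' =>
          simp only [List.head?_cons, Option.some.injEq] at hv
          exact ⟨v', by rw [hv]⟩
      have : xc = '<' := (List.cons_prefix_cons.mp hx).1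
      exact absurd this (hcl xc (by simp))
  | case3 c t hpre ih =>
    intro x hcl hx
    rw [repl, if_neg hpre] at hx
    match x, hx with
    | [], _ => exact List.nil_prefix
    | xc :: x', hx =>
      obtain ⟨rfl, hx'⟩ := List.cons_prefix_cons.mp hx
      exact List.cons_prefix_cons.mpr ⟨rfl, ih x' (fun d hd => hcl d (by simp [hd])) hx'⟩

theorem repl_append {k v : List Char} {a : List Char} (hb : barrier a k = true) (b : List Char) :
    repl k v (a ++ b) = a ++ repl k v b := by
  induction a with
  | nil => simp
  | cons c a' ih =>
    obtain ⟨hmm, hb'⟩ := barrier_cons hb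
    have hnp : ¬ k.isPrefixOf (c :: (a' ++ b)) = true := by
      rw [List.isPrefixOf_iff_prefix]
      exact notPrefix_append hmm b
    rw [List.cons_append, repl, if_neg hnp, ih hb']
    simp

theorem scan_append {rs : List (List Char × List Char)} {a : List Char}
    (hsp : a.all (fun c => c ≠ ' ') = true)
    (hb : ∀ p ∈ rs, barrier a p.1 = true) (b : List Char) :
    scanRepl rs (a ++ b) = a ++ scanRepl rs b := by
  induction a with
  | nil => simp
  | cons c a' ih =>
    have hfind : rs.find? (fun p => p.1.isPrefixOf (c :: (a' ++ b))) = none := by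
      rw [List.find?_eq_none]
      intro p hp
      simp only [List.isPrefixOf_iff_prefix]
      exact notPrefix_append (barrier_cons (hb p hp)).1 b
    have hc : ¬ c = ' ' := by simpa using (List.all_eq_true.mp hsp) c (by simp)
    rw [List.cons_append, scanRepl, hfind]
    simp only [if_neg hc]
    rw [ih (by simpa using fun d hd => (List.all_eq_true.mp hsp) d (by simp [hd]))
        (fun p hp => (barrier_cons (hb p hp)).2)]
    simp

-- the hypothesis bundle for one pipeline step
def stepHyp (k v : List Char) (rs : List (List Char × List Char)) : Prop :=
  k ≠ [] ∧ v.head? = some '<' ∧ v.all (fun c => c ≠ ' ') = true ∧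
  (∀ p ∈ rs, p.1 ≠ []) ∧
  (∀ p ∈ rs, p.1.head? = some '<') ∧
  (∀ p ∈ rs, p.1.tail.all (fun c => c ≠ '<') = true) ∧
  (∀ p ∈ rs, barrier v p.1 = true) ∧
  (∀ p ∈ rs, barrier p.1 k = true) ∧
  (∀ p ∈ rs, ∀ q ∈ rs, p ≠ q → mm p.1 q.1 = true)

theorem step {k v : List Char} {rs : List (List Char × List Char)}
    (H : stepHyp k v rs) (l : List Char) :
    scanRepl rs (repl k v l) = scanRepl ((k, v) :: rs) l := by
  obtain ⟨h1, h2, h3, h5, h6, h7, h8, h9, h10⟩ := H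
  induction hn : l.length using Nat.strong_induction_on generalizing l with
  | _ n ih =>
  subst hn
  match l with
  | [] => simp [repl, scanRepl]
  | c :: t =>
    by_cases hk : k.isPrefixOf (c :: t) = true
    · -- k matches at the head
      rw [repl, if_pos hk]
      have hdl : (t.drop (k.length - 1)).length < (c :: t).length := by
        simp [List.length_drop]
      have hfind : List.find? (fun p => p.1.isPrefixOf (c :: t)) ((k, v) :: rs) = some (k, v) := by
        simp only [List.find?_cons, hk]
      rw [scan_append h3 h8, ih _ hdl _ rfl]
      rw [scanRepl_cons_some hfind]
    · have hkne : (fun p : List Char × List Char => p.1.isPrefixOf (c :: t)) (k, v) ≠ true := hk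
      cases hf : rs.find? (fun p => p.1.isPrefixOf (c :: t)) with
      | some p =>
        have hmem : p ∈ rs := List.mem_of_find?_eq_some hf
        have hps := List.find?_some hf
        simp only at hps
        have hppre : p.1 <+: (c :: t) := List.isPrefixOf_iff_prefix.mp hps
        have hpne : p.1 ≠ [] := h5 p hmem
        obtain ⟨pc, pt, hp1⟩ : ∃ pc pt, p.1 = pc :: pt := by
          cases p1 : p.1 with
          | nil => exact absurd p1 hpne
          | cons a b => exact ⟨a, b, rfl⟩
        obtain ⟨X, hX⟩ := hppre
        have hpct : pc = c ∧ pt ++ X = t := by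
          rw [hp1] at hX; simpa using hX
        have hXlen : X.length < (c :: t).length := by
          have := congrArg List.length hpct.2
          simp at this ⊢
          omega
        have hk' : k.isPrefixOf (c :: t) = false := by rw [Bool.eq_false_iff]; exact hk
        have hfind3 : List.find? (fun q => q.1.isPrefixOf (c :: t)) ((k, v) :: rs) = some p := by
          simp only [List.find?_cons, hk', hf]
        have hdrop2 : t.drop (p.1.length - 1) = X := by
          rw [← hpct.2, hp1]; simp
        -- RHS first: the first matching pair of B's table is p
        rw [scanRepl_cons_some hfind3, hdrop2]
        -- LHS: repl k v passes over the matched key untouched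
        rw [show c :: t = p.1 ++ X from hX.symm, repl_append (h9 p hmem)]
        have hfind2 : rs.find? (fun q => q.1.isPrefixOf (pc :: (pt ++ repl k v X))) = some p := by
          apply find?_eq_some_of _ _ _ hmem
          · simp only [List.isPrefixOf_iff_prefix, hp1]
            rw [← List.cons_append]
            exact List.prefix_append _ _
          · intro q hq hqpre
            by_contra hne
            apply notPrefix_append (h10 p hmem q hq (fun h => hne h.symm)) (repl k v X)
            rw [hp1, List.cons_append]
            simpa [List.isPrefixOf_iff_prefix] using hqpre
        have hL : p.1 ++ repl k v X = pc :: (pt ++ repl k v X) := by rw [hp1]; simp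
        rw [hL, scanRepl_cons_some hfind2]
        have hdrop1 : (pt ++ repl k v X).drop (p.1.length - 1) = repl k v X := by
          rw [hp1]; simp
        rw [hdrop1, ih _ hXlen _ rfl]
      | none =>
        rw [repl, if_neg hk]
        have hrsnone := List.find?_eq_none.mp hf
        have hk' : k.isPrefixOf (c :: t) = false := by rw [Bool.eq_false_iff]; exact hk
        have hfind3 : List.find? (fun q => q.1.isPrefixOf (c :: t)) ((k, v) :: rs) = none := by
          simp only [List.find?_cons, hk', hf]
        rw [scanRepl_cons_none hfind3]
        by_cases hc : c = ' '
        · subst hc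
          have hfind2 : rs.find? (fun q => q.1.isPrefixOf (' ' :: repl k v t)) = none := by
            rw [List.find?_eq_none]
            intro q hq
            obtain ⟨qt, hq1⟩ : ∃ qt, q.1 = '<' :: qt := by
              have := h6 q hq
              cases q1 : q.1 with
              | nil => rw [q1] at this; simp at this
              | cons a b => rw [q1] at this; simp at this; exact ⟨b, by rw [this]⟩
            simp [hq1, List.isPrefixOf]
          rw [scanRepl_cons_none hfind2]
          simp only [reduceIte]
          exact ih _ (by simp) _ rfl
        · have hfind2 : rs.find? (fun q => q.1.isPrefixOf (c :: repl k v t)) = none := by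
            rw [List.find?_eq_none]
            intro q hq hqpre
            simp only [List.isPrefixOf_iff_prefix] at hqpre
            obtain ⟨qt, hq1⟩ : ∃ qt, q.1 = '<' :: qt := by
              have := h6 q hq
              cases q1 : q.1 with
              | nil => rw [q1] at this; simp at this
              | cons a b => rw [q1] at this; simp at this; exact ⟨b, by rw [this]⟩
            rw [hq1] at hqpre
            obtain ⟨hcq, hqt⟩ := List.cons_prefix_cons.mp hqpre
            have hqt' : qt <+: t := by
              apply clean_prefix h2 t qt _ hqt
              intro d hd
              have := h7 q hq
              rw [hq1] at this
              simp only [List.tail_cons] at this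
              simpa using (List.all_eq_true.mp this) d hd
            exact hrsnone q hq (by simp [List.isPrefixOf_iff_prefix, hq1, ← hcq, hqt'])
          rw [scanRepl_cons_none hfind2]
          simp only [if_neg hc]
          rw [ih _ (by simp) _ rfl]

theorem nosp_eq (l : List Char) : repl [' '] [] l = scanRepl [] l := by
  induction hn : l.length using Nat.strong_induction_on generalizing l with
  | _ n ih =>
  subst hn
  match l with
  | [] => simp [repl, scanRepl]
  | c :: t =>
    rw [repl, scanRepl]
    simp only [List.find?_nil]
    by_cases hc : c = ' '
    · subst hc
      rw [if_pos (by simp [List.isPrefixOf]), if_pos rfl]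
      simpa using ih _ (by simp) _ rfl
    · rw [if_neg (by simp [List.isPrefixOf]; exact fun h => hc h.symm), if_neg hc]
      rw [ih _ (by simp) _ rfl]

theorem go_eq_repl (k v : List Char) (hk : k ≠ []) :
    ∀ fuel l acc, l.length ≤ fuel →
      PySem.Chars.replace.go k v fuel l acc = acc.reverse ++ repl k v l := by
  intro fuel
  induction fuel with
  | zero =>
    intro l acc hl
    have : l = [] := by cases l <;> simp_all
    subst this
    rw [PySem.Chars.replace.go.eq_def]
    simp [repl]
  | succ fuel ih =>
    intro l acc hl
    match l with
    | [] => rw [PySem.Chars.replace.go.eq_def]; simp [repl]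
    | c :: t =>
      rw [PySem.Chars.replace.go.eq_def]
      simp only []
      by_cases hp : k.isPrefixOf (c :: t) = true
      · rw [if_pos hp, repl, if_pos hp]
        have hkl : 1 ≤ k.length := by cases k <;> simp_all
        have hdrop : List.drop k.length (c :: t) = t.drop (k.length - 1) := by
          cases k with
          | nil => simp_all
          | cons a b => simp
        rw [hdrop, ih _ _ (by simp at hl ⊢; omega)]
        simp
      · rw [if_neg hp, repl, if_neg hp]
        rw [ih _ _ (by simp at hl; omega)]
        simp

theorem replace_eq_repl (k v l : List Char) (hk : k ≠ []) :
    PySem.Chars.replace l k v = repl k v l := by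
  rw [PySem.Chars.replace]
  rw [if_neg (by simpa [List.isEmpty_iff] using hk)]
  simpa using go_eq_repl k v hk l.length l [] le_rfl

-- ===== VERDICT (by name: the statement is the Claim_ definition above) =====
theorem normalize_relation_py_spec : Claim_equal_normalize_relation_py := by
  unfold Claim_equal_normalize_relation_py
  intro relation _
  unfold Spec_normalize_relation_py
  apply String.toList_inj.mp
  rw [normalize_relation_py, normalize_relation_py_alt]
  simp only [pvReplacementsA, List.foldl_cons, List.foldl_nil, PySem.Str.toList_replace]
  rw [show (" " : String).toList = [' '] from rfl, show ("" : String).toList = [] from rfl]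
  rw [replace_eq_repl _ _ _ (by decide)]
  rw [replace_eq_repl _ _ _ (by simp)]
  rw [replace_eq_repl _ _ _ (by simp)]
  rw [replace_eq_repl _ _ _ (by simp)]
  rw [replace_eq_repl _ _ _ (by simp)]
  rw [replace_eq_repl _ _ _ (by simp)]
  rw [nosp_eq]
  rw [step (k := "<Dependency>".toList) (v := "<:dependency>".toList) (rs := []) (by unfold stepHyp; decide)]
  rw [step (k := "<correlation>".toList) (v := "<:association>".toList) (rs := [("<Dependency>".toList, "<:dependency>".toList)]) (by unfold stepHyp; decide)]
  rw [step (k := "<aggregation>".toList) (v := "<:aggregation>".toList) (rs := [("<correlation>".toList, "<:association>".toList), ("<Dependency>".toList, "<:dependency>".toList)]) (by unfold stepHyp; decide)]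
  rw [step (k := "<composition>".toList) (v := "<:composition>".toList) (rs := [("<aggregation>".toList, "<:aggregation>".toList), ("<correlation>".toList, "<:association>".toList), ("<Dependency>".toList, "<:dependency>".toList)]) (by unfold stepHyp; decide)]
  rw [step (k := "<extend>".toList) (v := "<:inheritance>".toList) (rs := [("<composition>".toList, "<:composition>".toList), ("<aggregation>".toList, "<:aggregation>".toList), ("<correlation>".toList, "<:association>".toList), ("<Dependency>".toList, "<:dependency>".toList)]) (by unfold stepHyp; decide)]
  rw [show ((String.ofList (scanRepl pvPairs relation.toList)).toList) = scanRepl pvPairs relation.toList by simp]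
  rfl
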